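-- pv_equiv track=rewrite | github.com/chohan3036/algo_study | Simulation/17683_방금그곡.py | solution
-- ===== SOURCE A (Python) =====
-- prv = ['C#', 'D#', 'F#', 'G#', 'A#']
--
-- lat = ['c', 'd', 'f', 'g', 'a']
--
-- def solution(m, musicinfos):
--     for i in range(len(prv)):
--         m = m.replace(prv[i], lat[i])
--
--     ans = []
--     idx = 0
--     for music in musicinfos:
--         # 음악이 시작하고 끝난 시간, 제목, 악보를 , 기준으로 분리
--         start, end, title, melody = map(str, music.split(','))
--         for i in range(len(prv)):
--             melody = melody.replace(prv[i], lat[i])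
--
--         # 음악이 재생된 시간을 구하기 위해 시간/분 단위로 분리해 계산
--         start_h, start_m = map(int, start.split(':'))
--         end_h, end_m = map(int, end.split(':'))
--         time = (end_h * 60 + end_m) - (start_h * 60 + start_m)
--
--         # 재생시간이 악보 길이보다 길거나 짧을 때
--         if time > len(melody):
--             # 길면 처음부터 남은 시간만큼 다시 재생함
--             melody = melody * (time // len(melody)) + melody[: time % len(melody)]
--
--         # 짧으면 재생 시간만큼만 재생함
--         elif time < len(melody):
--             melody = melody[: time]
--
--         # 처리된 음악이 네오가 기억한 멜로디와 같으면 제목 반환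
--         if m in melody:
--             ans.append((time, idx, title))
--             idx += 1
--
--     if ans:
--         ans = sorted(ans, key=lambda x: (x[0], -x[1]), reverse=True)
--         return ans[0][2]
--     else:
--         return '(None)'
-- ===== SOURCE B (Python) =====
-- prv = ['C#', 'D#', 'F#', 'G#', 'A#']
--
-- lat = ['c', 'd', 'f', 'g', 'a']
--
-- def _norm(s):
--     for p, l in zip(prv, lat):
--         s = s.replace(p, l)
--     return s
--
-- def _minutes(t):
--     h, mm = t.split(':')
--     return int(h) * 60 + int(mm)
--
-- def _candidate(m, info):
--     start, end, title, melody = info.split(',')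
--     melody = _norm(melody)
--     time = _minutes(end) - _minutes(start)
--     # played melody: one modular-index construction covers repeat/truncate/equal
--     played = ''.join(melody[i % len(melody)] for i in range(time))
--     return (time, title) if m in played else None
--
-- def solution(m, musicinfos):
--     m = _norm(m)
--     cands = [c for c in (_candidate(m, info) for info in musicinfos) if c is not None]
--     best = (-1, '(None)')
--     for c in cands:
--         if best[0] < c[0]:
--             best = c
--     return best[1]
-- ===== Notes on version B (the rewrite author's own statement) =====
-- stated objective: simpler
-- what changed: B is a two-stage pipeline: a per-entry _candidate helper parses an info string and builds the played melody with one modular-index join (replacing A's if/elif repeat-and-truncate branches), producing an optional (time, title); the matches are then collected and reduced to a running best updated only on strictly greater play time (replacing A's collect-all list with indices, sort by (time, -idx) descending and take-head selection).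
-- outside the precondition, e.g. on solution('c', ['10:00,09:58,T,ccc']): A returns 'T', B returns '(None)'
import Mathlib
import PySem

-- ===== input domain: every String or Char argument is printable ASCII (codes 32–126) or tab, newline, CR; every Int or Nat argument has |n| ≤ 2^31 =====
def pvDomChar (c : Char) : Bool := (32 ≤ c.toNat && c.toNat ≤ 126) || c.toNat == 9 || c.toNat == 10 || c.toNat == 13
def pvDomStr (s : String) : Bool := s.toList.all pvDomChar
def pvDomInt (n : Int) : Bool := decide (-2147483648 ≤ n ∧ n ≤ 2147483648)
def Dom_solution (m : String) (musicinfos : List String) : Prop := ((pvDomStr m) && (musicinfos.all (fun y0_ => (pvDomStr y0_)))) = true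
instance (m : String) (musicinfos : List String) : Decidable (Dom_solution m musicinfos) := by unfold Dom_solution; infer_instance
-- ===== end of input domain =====

-- B is a two-stage pipeline: a per-entry candidate helper builds the played melody with one
-- modular-index construction (replacing A's if/elif repeat/truncate branches) and yields an
-- optional (time, title); the matches are then reduced to a running best updated on strictly
-- greater play time (replacing A's collect-all/sort/head selection).  Objective: simpler.
-- Equivalence is claimed on well-formed music infos with non-negative play time (Pre_solution).

-- ===== PORT A =====
def prvA : List String := ["C#", "D#", "F#", "G#", "A#"]
def latA : List String := ["c", "d", "f", "g", "a"]

-- for i in range(len(prv)): s = s.replace(prv[i], lat[i])   (indexing is always in range)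
def normA (s : String) : String :=
  (PySem.List.pyRange 0 (prvA.length : Int)).foldl
    (fun acc i => PySem.Str.replace acc (PySem.List.pyGetD prvA i "") (PySem.List.pyGetD latA i "")) s

-- one iteration of A's loop over musicinfos; state = (ans, idx).  On inputs where Python would
-- raise (wrong field counts, unparsable ints, empty melody with positive time) the state is
-- returned unchanged — those inputs are excluded by Pre_solution.
def stepA (m : String) (st : List (Int × Int × String) × Int) (music : String) :
    List (Int × Int × String) × Int :=
  match PySem.Str.split? music "," with
  | some [start, stop, title, melody0] =>
    let melody := normA melody0
    match PySem.Str.split? start ":", PySem.Str.split? stop ":" with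
    | some [sh, sm], some [eh, em] =>
      match PySem.Int.ofStr? sh, PySem.Int.ofStr? sm, PySem.Int.ofStr? eh, PySem.Int.ofStr? em with
      | some a, some b, some c, some d =>
        let time : Int := (c * 60 + d) - (a * 60 + b)
        let L : Int := PySem.Str.len melody
        let melody2 : String := String.ofList
          (if time > L then
            PySem.List.pyRepeat melody.toList (PySem.Int.floordiv time L) ++
              PySem.List.slice melody.toList none (some (PySem.Int.mod time L))
          else if time < L then
            PySem.List.slice melody.toList none (some time)
          else melody.toList)
        if PySem.Str.isIn m melody2 = true then (st.1 ++ [(time, st.2, title)], st.2 + 1) else st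
      | _, _, _, _ => st
    | _, _ => st
  | _ => st

def solution (m : String) (musicinfos : List String) : String :=
  let mm := normA m
  let res := musicinfos.foldl (stepA mm) ([], 0)
  if res.1.isEmpty then "(None)"
  else
    match PySem.List.sorted2 res.1 (fun x => x.1) (fun x => -x.2.1) true with
    | top :: _ => top.2.2
    | [] => "(None)"   -- unreachable: sorted2 of a non-empty list is non-empty

-- ===== PORT B =====
def prvB : List String := ["C#", "D#", "F#", "G#", "A#"]
def latB : List String := ["c", "d", "f", "g", "a"]

-- for p, l in zip(prv, lat): s = s.replace(p, l)
def normB (s : String) : String :=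
  (prvB.zip latB).foldl (fun acc pl => PySem.Str.replace acc pl.1 pl.2) s

-- _minutes(t): h, mm = t.split(':'); int(h)*60 + int(mm)   (none = Python raises; outside Pre_)
def minutesB (t : String) : Option Int :=
  match PySem.Str.split? t ":" with
  | some [h, mn] =>
    match PySem.Int.ofStr? h, PySem.Int.ofStr? mn with
    | some a, some b => some (a * 60 + b)
    | _, _ => none
  | _ => none

-- _candidate(m, info): parse one info, build 'played' by the modular-index join, and return
-- some (time, title) iff m occurs in it.  The pyGetD default ' ' is never used on inputs
-- admitted by Pre_solution (Python raises only for an empty melody with time > 0, excluded).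
def candB (m : String) (info : String) : Option (Int × String) :=
  match PySem.Str.split? info "," with
  | some [start, stop, title, melody0] =>
    match minutesB stop, minutesB start with
    | some e, some s =>
      let mel := (normB melody0).toList
      let time : Int := e - s
      let played := (PySem.List.pyRange 0 time).map
        (fun i => PySem.List.pyGetD mel (PySem.Int.mod i (mel.length : Int)) ' ')
      if PySem.Str.isIn m (String.ofList played) = true then some (time, title) else none
    | _, _ => none
  | _ => none

-- cands = [c for c in (_candidate(m, info) for info in musicinfos) if c is not None];
-- then the running-best loop over cands
def solution_alt (m : String) (musicinfos : List String) : String :=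
  let cands := musicinfos.filterMap (candB (normB m))
  (cands.foldl (fun best c => if best.1 < c.1 then c else best) (-1, "(None)")).2

-- ===== PRECONDITION & SPEC =====
-- Pre_solution excludes entries on which A raises (not 4 comma fields, unparsable clock fields,
-- empty melody with positive play time) and entries with a negative play time (end before
-- start), on which A's truncation via a negative slice from the END of the melody is an
-- accidental corner nobody would specify.
def wfMusic (music : String) : Bool :=
  match PySem.Str.split? music "," with
  | some [start, stop, _, melody0] =>
    match PySem.Str.split? start ":", PySem.Str.split? stop ":" with
    | some [sh, sm], some [eh, em] =>
      match PySem.Int.ofStr? sh, PySem.Int.ofStr? sm, PySem.Int.ofStr? eh, PySem.Int.ofStr? em with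
      | some a, some b, some c, some d =>
        decide (a * 60 + b ≤ c * 60 + d) && (decide (melody0 ≠ "") || decide (a * 60 + b = c * 60 + d))
      | _, _, _, _ => false
    | _, _ => false
  | _ => false

def Pre_solution (m : String) (musicinfos : List String) : Prop :=
  musicinfos.all wfMusic = true
instance (m : String) (musicinfos : List String) : Decidable (Pre_solution m musicinfos) := by
  unfold Pre_solution; infer_instance

def pvWitness_solution : String × List String :=
  ("ABC", ["12:00,12:14,HELLO,C#BCC#BC", "13:00,13:05,WORLD,ABCDEF"])

def Spec_solution (m : String) (musicinfos : List String) (out : String) : Prop := out = solution_alt m musicinfos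
instance (m : String) (musicinfos : List String) (out : String) : Decidable (Spec_solution m musicinfos out) := by unfold Spec_solution; infer_instance

-- ===== CLAIM (what is proved, stated in full; the proofs are below) =====
def Claim_equal_solution : Prop := ∀ (m : String) (musicinfos : List String), Dom_solution m musicinfos → Pre_solution m musicinfos → Spec_solution m musicinfos (solution m musicinfos)

-- ===== LEMMAS AND PROOFS =====

theorem norm_eq (s : String) : normA s = normB s := rfl

-- replace never empties a non-empty string when the replacement is non-empty
theorem replace_go_ne_nil (old new : List Char) (hnew : new ≠ [])
    (fuel : Nat) : ∀ (l acc : List Char), (acc ≠ [] ∨ l ≠ []) →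
    PySem.Chars.replace.go old new fuel l acc ≠ [] := by
  induction fuel with
  | zero =>
    intro l acc h
    rw [PySem.Chars.replace.go]
    rcases h with h | h <;> simp_all
  | succ n ih =>
    intro l acc h
    match l with
    | [] =>
      have hacc : acc ≠ [] := by tauto
      rw [PySem.Chars.replace.go]
      simp_all
      omega
    | c :: t =>
      rw [PySem.Chars.replace.go]
      split
      · exact ih _ _ (Or.inl (by simp [hnew]))
      · exact ih _ _ (Or.inl (by simp))

theorem replace_ne_nil (s old new : List Char) (hs : s ≠ []) (hnew : new ≠ []) :
    PySem.Chars.replace s old new ≠ [] := by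
  rw [PySem.Chars.replace]
  split
  · simp [hnew]
  · exact replace_go_ne_nil old new hnew _ _ _ (Or.inr hs)

theorem str_replace_ne_empty (t o n : String) (ht : t ≠ "") (hn : n ≠ "") :
    PySem.Str.replace t o n ≠ "" := by
  intro h
  apply replace_ne_nil t.toList o.toList n.toList
    (by simpa [← String.toList_eq_nil_iff] using ht)
    (by simpa [← String.toList_eq_nil_iff] using hn)
  rw [← PySem.Str.toList_replace, h]; rfl

theorem normB_ne_empty (s : String) (hs : s ≠ "") : normB s ≠ "" := by
  show PySem.Str.replace (PySem.Str.replace (PySem.Str.replace (PySem.Str.replace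
    (PySem.Str.replace s "C#" "c") "D#" "d") "F#" "f") "G#" "g") "A#" "a" ≠ ""
  apply str_replace_ne_empty _ _ _ ?_ (by decide)
  apply str_replace_ne_empty _ _ _ ?_ (by decide)
  apply str_replace_ne_empty _ _ _ ?_ (by decide)
  apply str_replace_ne_empty _ _ _ ?_ (by decide)
  exact str_replace_ne_empty _ _ _ hs (by decide)

-- the cyclic expansion of a melody, at the Nat level
theorem take_eq_map_range (mel : List Char) (r : Nat) (hr : r ≤ mel.length) :
    (List.range r).map (fun i => mel.getD (i % mel.length) ' ') = mel.take r := by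
  apply List.ext_getElem
  · simp [Nat.min_eq_left hr]
  · intro i h1 h2
    simp only [List.getElem_map, List.getElem_range, List.getElem_take]
    have hi : i < mel.length := lt_of_lt_of_le (by simpa using h1) hr
    rw [Nat.mod_eq_of_lt hi, List.getD_eq_getElem _ _ hi]

theorem cycle_aux (mel : List Char) (q : Nat) :
    ∀ r, r ≤ mel.length →
    (List.range (q * mel.length + r)).map (fun i => mel.getD (i % mel.length) ' ') =
      (List.replicate q mel).flatten ++ mel.take r := by
  induction q with
  | zero => intro r hr; simpa using take_eq_map_range mel r hr
  | succ n ih =>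
    intro r hr
    have hsplit : (n+1) * mel.length + r = mel.length + (n * mel.length + r) := by ring
    rw [hsplit, List.range_add, List.map_append, List.map_map]
    have h2 : (List.map (fun i => mel.getD (i % mel.length) ' ') (List.range mel.length)) = mel := by
      simpa using take_eq_map_range mel mel.length le_rfl
    have h3 : ((fun i => mel.getD (i % mel.length) ' ') ∘ fun x => mel.length + x) =
        (fun i => mel.getD (i % mel.length) ' ') := by
      funext i; simp [Nat.add_mod_left]
    rw [h3, ih r hr, h2, List.replicate_succ, List.flatten_cons, List.append_assoc]

theorem cycle (mel : List Char) (hl : 0 < mel.length) (n : Nat) :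
    (List.range n).map (fun i => mel.getD (i % mel.length) ' ') =
      (List.replicate (n / mel.length) mel).flatten ++ mel.take (n % mel.length) := by
  have := cycle_aux mel (n / mel.length) (n % mel.length) (le_of_lt (Nat.mod_lt _ hl))
  rwa [Nat.div_add_mod' n mel.length] at this

-- the if/elif repeat-truncate construction equals the modular-index construction
theorem playedA_eq (mel : List Char) (time : Int) (ht : 0 ≤ time)
    (hok : 0 < mel.length ∨ time = 0) :
    (if time > (mel.length : Int) then
       PySem.List.pyRepeat mel (PySem.Int.floordiv time (mel.length : Int)) ++
         PySem.List.slice mel none (some (PySem.Int.mod time (mel.length : Int)))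
     else if time < (mel.length : Int) then PySem.List.slice mel none (some time)
     else mel) =
    (PySem.List.pyRange 0 time).map
      (fun i => PySem.List.pyGetD mel (PySem.Int.mod i (mel.length : Int)) ' ') := by
  lift time to Nat using ht with n
  rcases hok with hl | h0
  · rw [PySem.List.pyRange_zero_natCast, List.map_map]
    have hrhs : ((fun i => PySem.List.pyGetD mel (PySem.Int.mod i (mel.length : Int)) ' ') ∘
        (fun k : Nat => (k : Int))) = fun k : Nat => mel.getD (k % mel.length) ' ' := by
      funext k
      simp only [Function.comp_apply]
      rw [PySem.Int.mod_natCast, PySem.List.pyGetD_natCast]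
    rw [hrhs, cycle mel hl n]
    rcases lt_trichotomy n mel.length with hlt | heq | hgt
    · rw [if_neg (by exact_mod_cast not_lt_of_gt hlt), if_pos (by exact_mod_cast hlt),
        PySem.List.slice_to mel (by positivity), Nat.div_eq_of_lt hlt, Nat.mod_eq_of_lt hlt]
      simp
    · rw [if_neg (by omega), if_neg (by omega), heq, Nat.div_self hl, Nat.mod_self]
      simp
    · rw [if_pos (by exact_mod_cast hgt), PySem.List.pyRepeat.eq_1,
        PySem.Int.floordiv_natCast, PySem.Int.mod_natCast, Int.toNat_natCast,
        PySem.List.slice_to mel (by positivity), Int.toNat_natCast]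
  · have hn : n = 0 := by exact_mod_cast h0
    subst hn
    rw [Nat.cast_zero]
    have hrange : PySem.List.pyRange 0 (0 : Int) = [] := rfl
    rw [hrange, List.map_nil, if_neg (by omega)]
    rcases Nat.eq_zero_or_pos mel.length with hz | hp
    · rw [if_neg (by omega)]
      exact List.length_eq_zero_iff.mp hz
    · rw [if_pos (by exact_mod_cast hp), PySem.List.slice_to mel le_rfl]
      simp

theorem ifA_match (bb : Bool) (T : Int) (ti : String)
    (st : List (Int × Int × String) × Int) :
    (if bb = true then (st.1 ++ [(T, st.2, ti)], st.2 + 1) else st) =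
    (match (if bb = true then some (T, ti) else none : Option (Int × String)) with
     | some p => (st.1 ++ [(p.1, st.2, p.2)], st.2 + 1)
     | none => st) := by
  cases bb <;> rfl

theorem candB_nonneg (m music : String) (hwf : wfMusic music = true)
    (t : Int) (ti : String) (h : candB m music = some (t, ti)) : 0 ≤ t := by
  unfold wfMusic at hwf
  unfold candB minutesB at h
  split at hwf
  case _ start stop x melody0 h1 =>
    split at hwf
    case _ sh sm eh em h2 h3 =>
      split at hwf
      case _ a b c d h4 h5 h6 h7 =>
        simp only [h1, h2, h3, h4, h5, h6, h7] at h
        simp only [Bool.and_eq_true, decide_eq_true_eq] at hwf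
        split at h
        · cases h; omega
        · cases h
      all_goals simp at hwf
    all_goals simp at hwf
  all_goals simp at hwf

theorem stepA_eq (m music : String) (hwf : wfMusic music = true)
    (st : List (Int × Int × String) × Int) :
    stepA m st music =
      match candB m music with
      | some p => (st.1 ++ [(p.1, st.2, p.2)], st.2 + 1)
      | none => st := by
  unfold wfMusic at hwf
  split at hwf
  case _ start stop x melody0 h1 =>
    split at hwf
    case _ sh sm eh em h2 h3 =>
      split at hwf
      case _ a b c d h4 h5 h6 h7 =>
        unfold stepA candB minutesB
        simp only [h1, h2, h3, h4, h5, h6, h7, PySem.Str.len_eq, norm_eq melody0]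
        simp only [Bool.and_eq_true, Bool.or_eq_true, decide_eq_true_eq] at hwf
        rw [playedA_eq (normB melody0).toList (c * 60 + d - (a * 60 + b)) (by omega)
          (by
            rcases hwf.2 with hne | heq
            · left
              have := normB_ne_empty melody0 hne
              have : (normB melody0).toList ≠ [] := by
                simpa [← String.toList_eq_nil_iff] using this
              have := List.length_pos_iff.mpr this
              omega
            · right; omega)]
        exact ifA_match _ _ _ _
      all_goals simp at hwf
    all_goals simp at hwf
  all_goals simp at hwf

def enumFrom : Int → List (Int × String) → List (Int × Int × String)
  | _, [] => []
  | k, x :: rs => (x.1, k, x.2) :: enumFrom (k + 1) rs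

theorem length_enumFrom (rs : List (Int × String)) : ∀ (k : Int),
    (enumFrom k rs).length = rs.length := by
  induction rs with
  | nil => intro k; rfl
  | cons x rs ih => intro k; simp [enumFrom, ih]

theorem getElem_enumFrom (rs : List (Int × String)) : ∀ (k : Int) (i : Nat)
    (h : i < rs.length),
    (enumFrom k rs)[i]'(by rw [length_enumFrom]; exact h) = (rs[i].1, k + i, rs[i].2) := by
  induction rs with
  | nil => intro k i h; simp at h
  | cons x rs ih =>
    intro k i h
    match i with
    | 0 => simp [enumFrom]
    | i + 1 =>
      simp only [enumFrom, List.getElem_cons_succ]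
      rw [ih (k+1) i (by simpa using h)]
      push_cast; ring_nf

theorem foldA_eq (m : String) (l : List String) :
    ∀ (ans : List (Int × Int × String)) (idx : Int), l.all wfMusic = true →
    l.foldl (stepA m) (ans, idx) =
      (ans ++ enumFrom idx (l.filterMap (candB m)),
        idx + (l.filterMap (candB m)).length) := by
  induction l with
  | nil => intro ans idx _; simp [enumFrom]
  | cons music l ih =>
    intro ans idx hall
    rw [List.all_cons, Bool.and_eq_true] at hall
    rw [List.foldl_cons, stepA_eq m music hall.1]
    cases hr : candB m music with
    | none => simp only [List.filterMap_cons_none hr]; exact ih ans idx hall.2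
    | some p =>
      rw [ih (ans ++ [(p.1, idx, p.2)]) (idx + 1) hall.2,
        List.filterMap_cons_some hr]
      simp [enumFrom, List.append_assoc, Prod.ext_iff]
      omega

theorem bestFold_spec (rs : List (Int × String)) : ∀ (b : Int) (s : String),
    (rs.foldl (fun st x => if st.1 < x.1 then x else st) (b, s) = (b, s) ∧ ∀ x ∈ rs, x.1 ≤ b) ∨
    (∃ j, ∃ hj : j < rs.length,
      rs.foldl (fun st x => if st.1 < x.1 then x else st) (b, s) = rs[j] ∧ b < rs[j].1 ∧
      (∀ i (hi : i < rs.length), rs[i].1 ≤ rs[j].1) ∧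
      (∀ i (hi : i < rs.length), i < j → rs[i].1 < rs[j].1)) := by
  induction rs with
  | nil => intro b s; left; simp
  | cons x rs ih =>
    intro b s
    rw [List.foldl_cons]
    by_cases hx : b < x.1
    · simp only [hx, if_pos]
      rcases ih x.1 x.2 with ⟨heq, hall⟩ | ⟨j, hj, heq, hb, hmax, hfirst⟩
      · right
        refine ⟨0, by simp, by simpa using heq, by simpa using hx, ?_, by omega⟩
        intro i hi
        match i with
        | 0 => simp
        | i + 1 => simpa using hall _ (by simp [List.getElem_mem (by simpa using hi)])
      · right
        refine ⟨j + 1, by simpa using hj, by simpa using heq, ?_, ?_, ?_⟩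
        · simp only [List.getElem_cons_succ]; omega
        · intro i hi
          match i with
          | 0 => simp only [List.getElem_cons_zero, List.getElem_cons_succ]; omega
          | i + 1 => simpa using hmax i (by simpa using hi)
        · intro i hi hij
          match i with
          | 0 => simp only [List.getElem_cons_zero, List.getElem_cons_succ]; omega
          | i + 1 => simpa using hfirst i (by simpa using hi) (by omega)
    · simp only [hx, if_neg, not_false_iff]
      rcases ih b s with ⟨heq, hall⟩ | ⟨j, hj, heq, hb, hmax, hfirst⟩
      · left
        refine ⟨heq, ?_⟩
        intro y hy
        rcases List.mem_cons.mp hy with rfl | hy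
        · omega
        · exact hall y hy
      · right
        refine ⟨j + 1, by simpa using hj, by simpa using heq, by simpa using hb, ?_, ?_⟩
        · intro i hi
          match i with
          | 0 => simp only [List.getElem_cons_zero, List.getElem_cons_succ]; omega
          | i + 1 => simpa using hmax i (by simpa using hi)
        · intro i hi hij
          match i with
          | 0 => simp only [List.getElem_cons_zero, List.getElem_cons_succ]; omega
          | i + 1 => simpa using hfirst i (by simpa using hi) (by omega)

theorem sorted2_eq_sorted_lex {α : Type} (xs : List α) (k1 k2 : α → Int) :
    PySem.List.sorted2 xs k1 k2 true =
      PySem.List.sorted xs (fun x => toLex ((k1 x, k2 x) : Int × Int)) true := by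
  rw [PySem.List.sorted_rev_eq_foldl_insertBy]
  unfold PySem.List.sorted2
  simp only []
  congr 1
  funext acc x
  congr 1
  funext a b
  rcases lt_trichotomy (k1 b) (k1 a) with h | h | h
  · simp [h, Prod.Lex.lt_iff]
  · simp [h, Prod.Lex.lt_iff]
  · simp [h, not_lt_of_gt h, Prod.Lex.lt_iff]
    omega

-- the selection step: head of A's reverse-sorted enumerated matches = B's running best
theorem select_eq (rs : List (Int × String)) (hnn : ∀ x ∈ rs, 0 ≤ x.1) :
    (if (enumFrom 0 rs).isEmpty then "(None)"
     else
       match PySem.List.sorted2 (enumFrom 0 rs) (fun x => x.1) (fun x => -x.2.1) true with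
       | top :: _ => top.2.2
       | [] => "(None)") =
    (rs.foldl (fun st x => if st.1 < x.1 then x else st) ((-1 : Int), "(None)")).2 := by
  cases rs with
  | nil => rfl
  | cons y rs' =>
    rw [if_neg (by simp [enumFrom])]
    rcases bestFold_spec (y :: rs') (-1) "(None)" with ⟨heq, hall⟩ | ⟨j, hj, heq, hb, hmax, hfirst⟩
    · exfalso
      have h1 := hall y List.mem_cons_self
      have h2 := hnn y List.mem_cons_self
      omega
    · rw [heq, sorted2_eq_sorted_lex]
      cases hs : PySem.List.sorted (enumFrom 0 (y :: rs'))
          (fun x => toLex ((x.1, -x.2.1) : Int × Int)) true with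
      | nil =>
        exfalso
        have := (PySem.List.sorted_eq_nil_iff (enumFrom 0 (y :: rs'))
          (fun x => toLex ((x.1, -x.2.1) : Int × Int)) true).mp hs
        simp [enumFrom] at this
      | cons top t =>
        have htopmem : top ∈ enumFrom 0 (y :: rs') := by
          rw [← PySem.List.mem_sorted (enumFrom 0 (y :: rs'))
            (fun x => toLex ((x.1, -x.2.1) : Int × Int)) true, hs]
          exact List.mem_cons_self
        have hmaxK := PySem.List.key_head_sorted_rev_ge (enumFrom 0 (y :: rs'))
          (fun x => toLex ((x.1, -x.2.1) : Int × Int)) hs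
        obtain ⟨i, hi, htop⟩ := List.mem_iff_getElem.mp htopmem
        have hi' : i < (y :: rs').length := by rwa [length_enumFrom] at hi
        have hei := getElem_enumFrom (y :: rs') 0 i hi'
        have hej := getElem_enumFrom (y :: rs') 0 j hj
        have hjmem : (enumFrom 0 (y :: rs'))[j]'(by rwa [length_enumFrom]) ∈
            enumFrom 0 (y :: rs') := List.getElem_mem _
        have hKj := hmaxK _ hjmem
        simp only [← htop, hei, hej, zero_add] at hKj
        rw [Prod.Lex.le_iff] at hKj
        have hmi := hmax i hi'
        have hij : i = j := by
          rcases hKj with hlt | ⟨heq1, hle2⟩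
          · simp at hlt; omega
          · simp at heq1 hle2
            rcases Nat.lt_or_ge i j with hlt | hge
            · exact absurd (hfirst i hi' hlt) (by omega)
            · omega
        subst hij
        show top.2.2 = (y :: rs')[i].2
        rw [← htop, hei]

-- ===== VERDICT (by name: the statement is the Claim_ definition above) =====
theorem solution_spec : Claim_equal_solution := by
  intro m musicinfos _hdom hpre
  have hall : musicinfos.all wfMusic = true := hpre
  unfold Spec_solution solution solution_alt
  simp only []
  rw [norm_eq, foldA_eq (normB m) musicinfos [] 0 hall]
  simp only [List.nil_append]
  exact select_eq (musicinfos.filterMap (candB (normB m)))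
    (by
      intro x hx
      rcases List.mem_filterMap.mp hx with ⟨music, hmu, hr⟩
      exact candB_nonneg _ _ (List.all_eq_true.mp hall music hmu) x.1 x.2 (by simpa using hr))
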